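-- pv_equiv track=rewrite | github.com/Goyatuzo/python-problems | code_forces/96/b/lucky_numbers.py | generate_super_lucky_numbers
-- ===== SOURCE A (Python) =====
-- from collections import deque
-- from typing import List
--
-- def is_super_lucky(number: str) -> bool:
-- 	fours = 0
-- 	sevens = 0
--
-- 	for digit in number:
-- 		if digit == '4':
-- 			fours += 1
-- 		elif digit == '7':
-- 			sevens += 1
--
-- 	return fours == sevens and sevens > 0
--
-- def generate_super_lucky_numbers(n: int) -> List[int]:
-- 	numbers = []
-- 	queue = deque([''])
--
-- 	while queue:
-- 		candidate = queue.pop()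
--
-- 		if len(candidate) <= n:
-- 			queue.appendleft(candidate + '4')
-- 			queue.appendleft(candidate + '7')
--
-- 		if is_super_lucky(candidate):
-- 			numbers.append(int(candidate))
--
--
-- 	return numbers
-- ===== SOURCE B (Python) =====
-- from itertools import product
--
-- def generate_super_lucky_numbers(n):
--     result = []
--     for length in range(1, n + 2):
--         for tup in product('47', repeat=length):
--             s = ''.join(tup)
--             fours = s.count('4')
--             if 2 * fours == len(s) and fours > 0:
--                 result.append(int(s))
--     return result
-- ===== Notes on version B (the rewrite author's own statement) =====
-- stated objective: simpler
-- what changed: Replaces the deque-based BFS over candidate strings (pop right, appendleft children) by a direct per-length enumeration: for every candidate length up to one more than n, itertools.product over the two lucky digits yields each candidate string in the order BFS visits them, and the balanced ones are kept.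
import Mathlib
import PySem

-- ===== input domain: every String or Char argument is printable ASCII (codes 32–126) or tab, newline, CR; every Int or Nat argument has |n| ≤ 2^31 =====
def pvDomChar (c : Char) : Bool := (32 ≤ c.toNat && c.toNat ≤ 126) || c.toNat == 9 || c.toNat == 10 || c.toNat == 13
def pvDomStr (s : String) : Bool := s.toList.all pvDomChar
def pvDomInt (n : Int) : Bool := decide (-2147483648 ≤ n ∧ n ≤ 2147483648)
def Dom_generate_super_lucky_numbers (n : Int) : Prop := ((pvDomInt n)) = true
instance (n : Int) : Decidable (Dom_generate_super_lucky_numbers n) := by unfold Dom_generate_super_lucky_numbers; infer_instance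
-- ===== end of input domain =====

-- B replaces A's deque-based BFS by a direct per-length enumeration of all 4/7 strings
-- (objective: simpler); return values are proved identical for every n.

-- ===== PORT A =====
-- int(candidate): only ever called on nonempty digit strings, where ofStr? succeeds,
-- so the .getD 0 default is unreachable.  (Shared by both ports: both Pythons call int().)
def pyIntStr (s : List Char) : Int := (PySem.Int.ofStr? (String.ofList s)).getD 0

-- the fours/sevens counting loop of is_super_lucky, step for step
def countA (s : List Char) : Int × Int :=
  s.foldl (fun (p : Int × Int) d =>
    if d = '4' then (p.1 + 1, p.2)
    else if d = '7' then (p.1, p.2 + 1)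
    else p) (0, 0)

def is_super_lucky (s : List Char) : Bool :=
  let fs := countA s
  decide (fs.1 = fs.2 ∧ 0 < fs.2)

-- weight for termination of the while loop: expanded children strictly lower the total
def pvWeight (n : Int) (s : List Char) : Nat := 3 ^ ((n + 2 - s.length).toNat)

-- the while loop; the deque is a list whose HEAD is the pop side (deque's right),
-- so appendleft('4') then appendleft('7') appends [c++"4", c++"7"] at the list's end.
def loopA (n : Int) : List (List Char) → List Int
  | [] => []
  | c :: q =>
    let q1 := if (c.length : Int) ≤ n then q ++ [c ++ ['4'], c ++ ['7']] else q
    (if is_super_lucky c then [pyIntStr c] else []) ++ loopA n q1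
termination_by q => (q.map (pvWeight n)).sum
decreasing_by
  split
  · rename_i h
    simp only [List.map_append, List.map_cons, List.map_nil, List.sum_append, List.sum_cons,
      List.sum_nil, pvWeight, List.length_append, List.length_cons, List.length_nil]
    push_cast
    have h2 : (n + 2 - (c.length : Int)).toNat = (n + 2 - ((c.length : Int) + 1)).toNat + 1 := by
      omega
    rw [h2, pow_succ]
    have hp : 0 < 3 ^ ((n + 2 - ((c.length : Int) + 1)).toNat) :=
      pow_pos (by norm_num) _
    omega
  · simp only [List.map_cons, List.sum_cons]
    have hp : 0 < pvWeight n c := pow_pos (by norm_num) _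
    omega

def generate_super_lucky_numbers (n : Int) : List Int := loopA n [[]]

-- ===== PORT B =====
-- itertools.product('47', repeat=L), in product's order (first coordinate varies slowest)
def prodB : Nat → List (List Char)
  | 0 => [[]]
  | k + 1 => (['4', '7'] : List Char).flatMap (fun d => (prodB k).map (fun s => d :: s))

-- Source B's balance test: 2 * s.count('4') == len(s) and s.count('4') > 0
def luckyB (s : List Char) : Bool :=
  decide (2 * (s.count '4' : Int) = (s.length : Int) ∧ 0 < (s.count '4' : Int))

def generate_super_lucky_numbers_alt (n : Int) : List Int :=
  (PySem.List.pyRange 1 (n + 2) 1).flatMap (fun L =>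
    (prodB L.toNat).flatMap (fun s => if luckyB s then [pyIntStr s] else []))

-- ===== PRECONDITION & SPEC =====
def Spec_generate_super_lucky_numbers (n : Int) (out : List Int) : Prop := out = generate_super_lucky_numbers_alt n
instance (n : Int) (out : List Int) : Decidable (Spec_generate_super_lucky_numbers n out) := by unfold Spec_generate_super_lucky_numbers; infer_instance

-- ===== CLAIM (what is proved, stated in full; the proofs are below) =====
def Claim_equal_generate_super_lucky_numbers : Prop := ∀ (n : Int), Dom_generate_super_lucky_numbers n → Spec_generate_super_lucky_numbers n (generate_super_lucky_numbers n)

-- ===== LEMMAS AND PROOFS =====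

-- the balanced 4/7 strings of length k, in A's BFS child order (= lexicographic)
def genA : Nat → List (List Char)
  | 0 => [[]]
  | k + 1 => (genA k).flatMap (fun s => [s ++ ['4'], s ++ ['7']])

def outL (ls : List (List Char)) : List Int :=
  ls.flatMap (fun c => if is_super_lucky c then [pyIntStr c] else [])

def chsL (n : Int) (ls : List (List Char)) : List (List Char) :=
  ls.flatMap (fun c => if (c.length : Int) ≤ n then [c ++ ['4'], c ++ ['7']] else [])

theorem loopA_nil (n : Int) : loopA n [] = [] := by simp [loopA]

theorem loopA_cons (n : Int) (c : List Char) (q : List (List Char)) :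
    loopA n (c :: q) =
      (if is_super_lucky c then [pyIntStr c] else []) ++
        loopA n (if (c.length : Int) ≤ n then q ++ [c ++ ['4'], c ++ ['7']] else q) := by
  rw [loopA]

-- the BFS loop processes the current level before the enqueued children
theorem loopA_level (n : Int) (ls pend : List (List Char)) :
    loopA n (ls ++ pend) = outL ls ++ loopA n (pend ++ chsL n ls) := by
  induction ls generalizing pend with
  | nil => simp [outL, chsL]
  | cons c t ih =>
    rw [List.cons_append, loopA_cons]
    by_cases h : (c.length : Int) ≤ n
    · simp only [h, if_pos]
      rw [List.append_assoc, ih (pend ++ [c ++ ['4'], c ++ ['7']])]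
      simp [outL, chsL, h, List.append_assoc]
    · simp only [h, if_neg, not_false_iff]
      rw [ih pend]
      simp [outL, chsL, h, List.append_assoc]

theorem mem_genA (k : Nat) (s : List Char) (hs : s ∈ genA k) :
    s.length = k ∧ ∀ c ∈ s, c = '4' ∨ c = '7' := by
  induction k generalizing s with
  | zero => simp [genA] at hs; simp [hs]
  | succ k ih =>
    simp only [genA, List.mem_flatMap] at hs
    obtain ⟨p, hp, hmem⟩ := hs
    obtain ⟨hlen, hch⟩ := ih p hp
    simp only [List.mem_cons, List.mem_singleton] at hmem
    rcases hmem with rfl | rfl | h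
    · constructor
      · simp [hlen]
      · intro c hc
        rcases List.mem_append.mp hc with h | h
        · exact hch c h
        · simp at h; left; exact h
    · constructor
      · simp [hlen]
      · intro c hc
        rcases List.mem_append.mp hc with h | h
        · exact hch c h
        · simp at h; right; exact h
    · cases h

theorem chsL_genA (n : Int) (k : Nat) (hk : (k : Int) ≤ n) :
    chsL n (genA k) = genA (k + 1) := by
  conv_rhs => rw [genA]
  unfold chsL
  refine List.flatMap_congr (fun s hs => ?_)
  have := (mem_genA k s hs).1
  rw [this]
  simp [hk]

theorem chsL_genA_nil (n : Int) (k : Nat) (hk : ¬ (k : Int) ≤ n) :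
    chsL n (genA k) = [] := by
  unfold chsL
  rw [List.flatMap_eq_nil_iff]
  intro s hs
  have := (mem_genA k s hs).1
  rw [this]
  simp [hk]

-- product order equals BFS/append order
theorem mix_genA (k j : Nat) :
    (genA j).flatMap (fun p => (prodB k).map (fun s => p ++ s)) = genA (j + k) := by
  induction k generalizing j with
  | zero => simp [prodB]
  | succ k ih =>
    have step : (genA j).flatMap (fun p => (prodB (k+1)).map (fun s => p ++ s)) =
        (genA (j+1)).flatMap (fun p => (prodB k).map (fun s => p ++ s)) := by
      simp only [prodB, genA, List.flatMap_cons, List.flatMap_nil, List.map_append,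
        List.map_map, List.append_nil, List.flatMap_append, List.flatMap_map]
      rw [List.flatMap_assoc]
      refine List.flatMap_congr (fun p _ => ?_)
      simp [Function.comp_def, List.append_assoc]
    rw [step, ih (j+1)]
    congr 1
    omega

theorem prodB_eq_genA (k : Nat) : prodB k = genA k := by
  have := mix_genA k 0
  simpa [genA, List.flatMap] using this

-- on 4/7-only strings the two balance tests agree
theorem count_split (s : List Char) (h : ∀ c ∈ s, c = '4' ∨ c = '7') :
    s.count '4' + s.count '7' = s.length := by
  induction s with
  | nil => simp
  | cons c t ih =>
    have hc := h c (by simp)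
    have ht := ih (fun c hc => h c (by simp [hc]))
    rcases hc with rfl | rfl <;> simp [List.count_cons, ht] <;> try omega

theorem countA_shift (s : List Char) (a b : Int) :
    s.foldl (fun (p : Int × Int) d =>
      if d = '4' then (p.1 + 1, p.2)
      else if d = '7' then (p.1, p.2 + 1)
      else p) (a, b) = (a + s.count '4', b + s.count '7') := by
  induction s generalizing a b with
  | nil => simp
  | cons c t ih =>
    by_cases h4 : c = '4'
    · simp only [List.foldl_cons, h4, if_pos, List.count_cons]
      rw [ih]
      simp [Prod.ext_iff]
      omega
    · by_cases h7 : c = '7'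
      · simp only [List.foldl_cons, h4, h7, if_pos, if_neg, not_false_iff, List.count_cons]
        rw [ih]
        simp [Prod.ext_iff, h4]
        omega
      · simp [List.foldl_cons, h4, h7, ih, List.count_cons]

theorem countA_eq (s : List Char) :
    countA s = ((s.count '4' : Int), (s.count '7' : Int)) := by
  have := countA_shift s 0 0
  simpa [countA] using this

theorem lucky_agree (s : List Char) (h : ∀ c ∈ s, c = '4' ∨ c = '7') :
    is_super_lucky s = luckyB s := by
  have hc := count_split s h
  simp only [is_super_lucky, luckyB, countA_eq]
  exact decide_eq_decide.mpr (by omega)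

theorem outL_prodB (k : Nat) :
    (prodB k).flatMap (fun s => if luckyB s then [pyIntStr s] else []) = outL (genA k) := by
  rw [prodB_eq_genA]
  unfold outL
  refine List.flatMap_congr (fun s hs => ?_)
  rw [lucky_agree s (mem_genA k s hs).2]

-- descending over the remaining levels
theorem loopA_levels (n : Int) (m k : Nat) (h : (k : Int) + m = n + 1) :
    loopA n (genA k) = (List.range' k (m + 1)).flatMap (fun L => outL (genA L)) := by
  induction m generalizing k with
  | zero =>
    have hk : ¬ (k : Int) ≤ n := by omega
    have := loopA_level n (genA k) []
    rw [List.append_nil] at this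
    rw [this, List.nil_append, chsL_genA_nil n k hk, loopA_nil]
    simp [List.range']
  | succ m ih =>
    have hk : (k : Int) ≤ n := by omega
    have := loopA_level n (genA k) []
    rw [List.append_nil] at this
    rw [this, List.nil_append, chsL_genA n k hk, ih (k + 1) (by push_cast; omega)]
    conv_rhs => rw [List.range'_succ]
    rw [List.flatMap_cons]

theorem genSLN_eq (n : Int) :
    generate_super_lucky_numbers n = generate_super_lucky_numbers_alt n := by
  unfold generate_super_lucky_numbers generate_super_lucky_numbers_alt
  by_cases hn : 0 ≤ n
  · -- first step: '' is expanded (0 ≤ n), not lucky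
    have h0 : loopA n [[]] = loopA n (genA 1) := by
      rw [loopA_cons]
      simp [is_super_lucky, countA, hn, genA]
    rw [h0, loopA_levels n n.toNat 1 (by omega)]
    rw [PySem.List.pyRange_one]
    have hlen : ((n + 2 - 1).toNat) = n.toNat + 1 := by omega
    rw [hlen]
    rw [List.flatMap_map, List.range'_eq_map_range, List.flatMap_map]
    refine List.flatMap_congr (fun k hk => ?_)
    rw [outL_prodB]
    congr 1
  · -- n < 0: '' is not expanded; both sides are []
    rw [loopA_cons]
    have h1 : ¬ ((([] : List Char).length : Int) ≤ n) := by simp; omega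
    simp only [h1, if_neg, not_false_iff]
    rw [loopA_nil]
    simp [is_super_lucky, countA, PySem.List.pyRange_one_eq_nil (by omega : n + 2 ≤ 1)]

-- ===== VERDICT (by name: the statement is the Claim_ definition above) =====
theorem generate_super_lucky_numbers_spec : Claim_equal_generate_super_lucky_numbers := by
  intro n _
  unfold Spec_generate_super_lucky_numbers
  exact genSLN_eq n
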